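-- pv_equiv track=rewrite | github.com/b-fa-ce/aoc-2024 | aoc_2024/day_05/src/utils.py | get_reorderd_centre_sum
-- ===== SOURCE A (Python) =====
-- import functools
--
-- def check_rule(instruction: list[int], rule: list[int, int]) -> bool:
--     if rule[0] in instruction and rule[1] in instruction:
--         if instruction.index(rule[0]) > instruction.index(rule[1]):
--             return False
--
--     return True
--
-- def check_rules(instruction: list[int], rules: list[list[int, int]]) -> bool:
--     return all([check_rule(instruction, rule) for rule in rules])
--
-- def compare(a, b, rules):
--     return -1 if [a, b] in rules else 1 if [b, a] in rules else 0
--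
-- def get_reorderd_centre_sum(instructions, rules):
--     unordered_instructions = [
--         ins for ins in instructions if not check_rules(ins, rules)
--     ]
--     sum_total = 0
--
--     for unordered in unordered_instructions:
--         ordered = sorted(
--             unordered, key=functools.cmp_to_key(lambda x, y: compare(x, y, rules))
--         )
--         if not len(ordered) % 2 == 1:
--             raise ValueError
--         sum_total += ordered[len(ordered) // 2]
--
--     return sum_total
-- ===== SOURCE B (Python) =====
-- def check_rule(instruction, rule):
--     if rule[0] in instruction and rule[1] in instruction:
--         if instruction.index(rule[0]) > instruction.index(rule[1]):
--             return False
--     return True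
--
--
-- def check_rules(instruction, rules):
--     return all([check_rule(instruction, rule) for rule in rules])
--
--
-- def get_reorderd_centre_sum(instructions, rules):
--     # One pass; the centre of each invalid list is found by rank counting
--     # (the element preceded by exactly len//2 others under the rules),
--     # instead of fully sorting it with a comparator.
--     total = 0
--     for ins in instructions:
--         if check_rules(ins, rules):
--             continue
--         if len(ins) % 2 != 1:
--             raise ValueError
--         m = len(ins) // 2
--         for x in ins:
--             if sum(1 for y in ins if [y, x] in rules) == m:
--                 total += x
--                 break
--     return total
-- ===== Notes on version B (the rewrite author's own statement) =====
-- stated objective: alternative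
-- what changed: B drops the filter-then-comparator-sort pipeline: in a single pass it finds each invalid list's centre directly by rank counting (the element preceded by exactly len//2 others under the rules) instead of sorting with functools.cmp_to_key and indexing the middle.
-- outside the precondition, e.g. on get_reorderd_centre_sum([[3, 1, 3]], [[1, 3], [3, 1]]): A returns 1, B returns 3; on get_reorderd_centre_sum([[1, 2, 3]], [[2, 1], [3, 2], [1, 3]]): A returns 2, B returns 1; on get_reorderd_centre_sum([[5, 4, 3, 2, 1]], [[1, 2], [2, 3], [3, 4], [4, 5]]): A returns 3, B returns 0
import Mathlib
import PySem

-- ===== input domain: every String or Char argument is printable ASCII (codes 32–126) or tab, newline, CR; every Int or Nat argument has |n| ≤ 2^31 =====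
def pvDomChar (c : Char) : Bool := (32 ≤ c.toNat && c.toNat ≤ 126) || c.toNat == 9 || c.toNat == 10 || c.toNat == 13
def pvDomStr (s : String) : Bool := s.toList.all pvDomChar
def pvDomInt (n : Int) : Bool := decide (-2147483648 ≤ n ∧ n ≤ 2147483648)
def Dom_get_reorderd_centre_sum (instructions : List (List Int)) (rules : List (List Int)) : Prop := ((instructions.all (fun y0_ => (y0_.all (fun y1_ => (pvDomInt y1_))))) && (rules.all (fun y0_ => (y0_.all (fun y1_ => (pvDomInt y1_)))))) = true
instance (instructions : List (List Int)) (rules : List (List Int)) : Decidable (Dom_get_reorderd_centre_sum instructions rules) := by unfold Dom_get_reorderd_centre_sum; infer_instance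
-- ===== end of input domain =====

-- B replaces the comparator sort of each invalid list by a direct rank-counting
-- selection of its centre element (alternative decomposition, similar cost).

-- ===== PORT A =====
def pv_check_rule (instruction : List Int) (rule : List Int) : Bool :=
  match PySem.List.pyGet? rule 0, PySem.List.pyGet? rule 1 with
  | some r0, some r1 =>
    if r0 ∈ instruction ∧ r1 ∈ instruction then
      match PySem.List.index? instruction r0, PySem.List.index? instruction r1 with
      | some i0, some i1 => !decide (i0 > i1)
      | _, _ => true   -- unreachable: membership guarantees index? = some
    else true
  | _, _ => true       -- Python raises IndexError here (rule shorter than 2); excluded by Pre_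

def pv_check_rules (instruction : List Int) (rules : List (List Int)) : Bool :=
  ((rules.map (fun rule => pv_check_rule instruction rule)).all (fun b => b))

def pv_compare (a b : Int) (rules : List (List Int)) : Int :=
  if [a, b] ∈ rules then -1 else if [b, a] ∈ rules then 1 else 0

-- Stable insertion sort with the comparator; exact for Python's sorted+cmp_to_key
-- whenever the comparator is a strict total order on the list's elements, which
-- Pre_ guarantees for every list that is actually sorted here.
def pv_insert (rules : List (List Int)) (x : Int) : List Int → List Int
  | [] => [x]
  | y :: ys => if pv_compare x y rules < 0 then x :: y :: ys else y :: pv_insert rules x ys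

def pv_csort (rules : List (List Int)) (l : List Int) : List Int :=
  l.foldl (fun acc x => pv_insert rules x acc) []

def get_reorderd_centre_sum (instructions : List (List Int)) (rules : List (List Int)) : Int :=
  (instructions.filter (fun ins => !pv_check_rules ins rules)).foldl
    (fun sum_total unordered =>
      if (pv_csort rules unordered).length % 2 == 1 then
        sum_total + ((PySem.List.pyGet? (pv_csort rules unordered)
          (PySem.Int.floordiv ((pv_csort rules unordered).length : Int) 2)).getD 0)
      else sum_total) 0   -- Python raises ValueError in the else branch; excluded by Pre_

-- ===== PORT B =====
def get_reorderd_centre_sum_alt (instructions : List (List Int)) (rules : List (List Int)) : Int :=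
  instructions.foldl (fun total ins =>
    if pv_check_rules ins rules then total
    else if ins.length % 2 != 1 then total   -- Python raises ValueError here; excluded by Pre_
    else
      match ins.find? (fun x => ins.countP (fun y => decide ([y, x] ∈ rules)) == ins.length / 2) with
      | some x => total + x
      | none => total) 0

-- ===== PRECONDITION & SPEC =====
-- closed-form test "this instruction list violates some rule" (first-occurrence
-- indices of a rule's two endpoints are out of order); mirrors, as a plain
-- condition, which lists A sorts
def pvInvalidB (rules : List (List Int)) (u : List Int) : Bool :=
  rules.any fun r =>
    match PySem.List.index? u (r.getD 0 0), PySem.List.index? u (r.getD 1 0) with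
    | some ia, some ib => decide (ib < ia)
    | _, _ => false

-- Pre_ excludes inputs where A raises (a rule with fewer than two entries, an
-- even-length invalid list) and invalid lists with duplicates or whose rules are
-- not a strict total order on their elements, where the middle of Python's
-- comparator sort is an accident of the sorting algorithm.
def Pre_get_reorderd_centre_sum (instructions : List (List Int)) (rules : List (List Int)) : Prop :=
  (instructions ≠ [] → ∀ r ∈ rules, 2 ≤ r.length) ∧
  ∀ u ∈ instructions, pvInvalidB rules u = true →
    u.length % 2 = 1 ∧ u.Nodup ∧
    (∀ a ∈ u, [a, a] ∉ rules) ∧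
    (∀ a ∈ u, ∀ b ∈ u, a ≠ b → ([a, b] ∈ rules ↔ [b, a] ∉ rules)) ∧
    (∀ a ∈ u, ∀ b ∈ u, ∀ c ∈ u, [a, b] ∈ rules → [b, c] ∈ rules → [a, c] ∈ rules)
instance (instructions : List (List Int)) (rules : List (List Int)) : Decidable (Pre_get_reorderd_centre_sum instructions rules) := by unfold Pre_get_reorderd_centre_sum; infer_instance

def pvWitness_get_reorderd_centre_sum : List (List Int) × List (List Int) :=
  ([[1, 3, 2], [1, 2, 3]], [[1, 2], [2, 3], [1, 3]])

def Spec_get_reorderd_centre_sum (instructions : List (List Int)) (rules : List (List Int)) (out : Int) : Prop := out = get_reorderd_centre_sum_alt instructions rules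
instance (instructions : List (List Int)) (rules : List (List Int)) (out : Int) : Decidable (Spec_get_reorderd_centre_sum instructions rules out) := by unfold Spec_get_reorderd_centre_sum; infer_instance

-- ===== CLAIM (what is proved, stated in full; the proofs are below) =====
def Claim_equal_get_reorderd_centre_sum : Prop := ∀ (instructions : List (List Int)) (rules : List (List Int)), Dom_get_reorderd_centre_sum instructions rules → Pre_get_reorderd_centre_sum instructions rules → Spec_get_reorderd_centre_sum instructions rules (get_reorderd_centre_sum instructions rules)

-- ===== LEMMAS AND PROOFS =====

theorem pv_insert_perm (rules : List (List Int)) (x : Int) (l : List Int) :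
    (pv_insert rules x l).Perm (x :: l) := by
  induction l with
  | nil => simp [pv_insert]
  | cons y ys ih =>
    simp only [pv_insert]
    split
    · exact List.Perm.refl _
    · exact (List.Perm.cons y ih).trans (List.Perm.swap x y ys)

theorem pv_foldl_insert_perm (rules : List (List Int)) :
    ∀ (l acc : List Int),
      (l.foldl (fun a x => pv_insert rules x a) acc).Perm (acc ++ l) := by
  intro l
  induction l with
  | nil => simp
  | cons x ls ih =>
    intro acc
    have h1 : (ls.foldl (fun a x => pv_insert rules x a) (pv_insert rules x acc)).Perm
        (pv_insert rules x acc ++ ls) := ih _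
    have h2 : (pv_insert rules x acc ++ ls).Perm ((x :: acc) ++ ls) :=
      (pv_insert_perm rules x acc).append_right ls
    have h3 : ((x :: acc) ++ ls).Perm (acc ++ x :: ls) := List.perm_middle.symm
    exact (h1.trans h2).trans h3

theorem pv_csort_perm (rules : List (List Int)) (l : List Int) :
    (pv_csort rules l).Perm l := by
  have := pv_foldl_insert_perm rules l []
  simpa [pv_csort] using this

theorem pv_compare_neg_iff (rules : List (List Int)) (x y : Int) :
    (pv_compare x y rules < 0) ↔ [x, y] ∈ rules := by
  unfold pv_compare
  split_ifs with h1 h2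
  · simp only [h1, iff_true]; norm_num
  · simp only [h1, iff_false]; norm_num
  · simp only [h1, iff_false]; norm_num

theorem pv_insert_sorted (rules : List (List Int)) (S : List Int)
    (htot : ∀ a ∈ S, ∀ b ∈ S, a ≠ b → ([a, b] ∈ rules ↔ [b, a] ∉ rules))
    (htrans : ∀ a ∈ S, ∀ b ∈ S, ∀ c ∈ S, [a, b] ∈ rules → [b, c] ∈ rules → [a, c] ∈ rules)
    (x : Int) (hx : x ∈ S) :
    ∀ l : List Int, (∀ y ∈ l, y ∈ S) → x ∉ l →
      l.Pairwise (fun a b => [a, b] ∈ rules) →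
      (pv_insert rules x l).Pairwise (fun a b => [a, b] ∈ rules) := by
  intro l
  induction l with
  | nil => intro _ _ _; simp [pv_insert]
  | cons y ys ih =>
    intro hsub hxl hp
    have hyS : y ∈ S := hsub y (by simp)
    have hysS : ∀ z ∈ ys, z ∈ S := fun z hz => hsub z (by simp [hz])
    have hpy : ∀ z ∈ ys, [y, z] ∈ rules := (List.pairwise_cons.mp hp).1
    have hpys : ys.Pairwise (fun a b => [a, b] ∈ rules) := (List.pairwise_cons.mp hp).2
    simp only [pv_insert]
    split_ifs with hc
    · have hxy : [x, y] ∈ rules := (pv_compare_neg_iff rules x y).mp hc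
      refine List.pairwise_cons.mpr ⟨?_, hp⟩
      intro z hz
      rcases List.mem_cons.mp hz with rfl | hz'
      · exact hxy
      · exact htrans x hx y hyS z (hysS z hz') hxy (hpy z hz')
    · have hnxy : [x, y] ∉ rules := fun h => hc ((pv_compare_neg_iff rules x y).mpr h)
      have hxny : x ≠ y := fun h => hxl (by simp [h])
      have hyx : [y, x] ∈ rules := by
        by_contra hn
        exact hnxy ((htot x hx y hyS hxny).mpr hn)
      have hxys : x ∉ ys := fun h => hxl (by simp [h])
      refine List.pairwise_cons.mpr ⟨?_, ih hysS hxys hpys⟩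
      intro z hz
      have hz' : z ∈ x :: ys := (pv_insert_perm rules x ys).mem_iff.mp hz
      rcases List.mem_cons.mp hz' with rfl | hz''
      · exact hyx
      · exact hpy z hz''

theorem pv_foldl_insert_sorted (rules : List (List Int)) (S : List Int)
    (htot : ∀ a ∈ S, ∀ b ∈ S, a ≠ b → ([a, b] ∈ rules ↔ [b, a] ∉ rules))
    (htrans : ∀ a ∈ S, ∀ b ∈ S, ∀ c ∈ S, [a, b] ∈ rules → [b, c] ∈ rules → [a, c] ∈ rules) :
    ∀ (l acc : List Int), (∀ y ∈ l, y ∈ S) → (∀ y ∈ acc, y ∈ S) →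
      (acc ++ l).Nodup → acc.Pairwise (fun a b => [a, b] ∈ rules) →
      (l.foldl (fun a x => pv_insert rules x a) acc).Pairwise (fun a b => [a, b] ∈ rules) := by
  intro l
  induction l with
  | nil => intro acc _ _ _ hp; simpa using hp
  | cons x ls ih =>
    intro acc hl hacc hnd hp
    have hxS : x ∈ S := hl x (by simp)
    have hnd' : (x :: (acc ++ ls)).Nodup := (List.perm_middle (l₁ := acc) (l₂ := ls)).nodup hnd
    have hxacc : x ∉ acc := fun h => (List.nodup_cons.mp hnd').1 (by simp [h])
    have haccnd : acc.Nodup := ((List.nodup_append.mp (List.nodup_cons.mp hnd').2)).1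
    have hins : (pv_insert rules x acc).Pairwise (fun a b => [a, b] ∈ rules) :=
      pv_insert_sorted rules S htot htrans x hxS acc hacc hxacc hp
    have hinsS : ∀ y ∈ pv_insert rules x acc, y ∈ S := by
      intro y hy
      rcases List.mem_cons.mp ((pv_insert_perm rules x acc).mem_iff.mp hy) with rfl | hy'
      · exact hxS
      · exact hacc y hy'
    have hndins : (pv_insert rules x acc ++ ls).Nodup := by
      have hperm : (pv_insert rules x acc ++ ls).Perm (x :: (acc ++ ls)) :=
        ((pv_insert_perm rules x acc).append_right ls)
      exact hperm.symm.nodup hnd'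
    exact ih (pv_insert rules x acc) (fun y hy => hl y (by simp [hy])) hinsS hndins hins

theorem pv_csort_sorted (rules : List (List Int)) (u : List Int)
    (hnd : u.Nodup)
    (htot : ∀ a ∈ u, ∀ b ∈ u, a ≠ b → ([a, b] ∈ rules ↔ [b, a] ∉ rules))
    (htrans : ∀ a ∈ u, ∀ b ∈ u, ∀ c ∈ u, [a, b] ∈ rules → [b, c] ∈ rules → [a, c] ∈ rules) :
    (pv_csort rules u).Pairwise (fun a b => [a, b] ∈ rules) := by
  unfold pv_csort
  exact pv_foldl_insert_sorted rules u htot htrans u [] (fun y hy => hy)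
    (by simp) (by simpa using hnd) (by simp)

theorem pv_rank_at (rules : List (List Int)) (s : List Int)
    (hs : s.Pairwise (fun a b => [a, b] ∈ rules))
    (hnd : s.Nodup)
    (hirr : ∀ a ∈ s, [a, a] ∉ rules)
    (hasym : ∀ a ∈ s, ∀ b ∈ s, a ≠ b → ([a, b] ∈ rules ↔ [b, a] ∉ rules))
    (m : Nat) (hm : m < s.length) :
    s.countP (fun y => decide ([y, s[m]] ∈ rules)) = m := by
  induction s generalizing m with
  | nil => simp at hm
  | cons a t ih =>
    have hat : ∀ z ∈ t, [a, z] ∈ rules := (List.pairwise_cons.mp hs).1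
    have hpt : t.Pairwise (fun x y => [x, y] ∈ rules) := (List.pairwise_cons.mp hs).2
    have hant : a ∉ t := (List.nodup_cons.mp hnd).1
    have hndt : t.Nodup := (List.nodup_cons.mp hnd).2
    cases m with
    | zero =>
      simp only [List.getElem_cons_zero]
      rw [List.countP_cons]
      simp
      refine ⟨?_, hirr a (by simp)⟩
      intro z hz
      have hza : z ≠ a := fun h => hant (h ▸ hz)
      exact (hasym a (by simp) z (by simp [hz]) (Ne.symm hza)).mp (hat z hz)
    | succ k =>
      have hk : k < t.length := by simpa using hm
      have hidx : (a :: t)[k + 1] = t[k] := by simp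
      rw [hidx, List.countP_cons]
      have h1 : (decide ([a, t[k]] ∈ rules)) = true := by
        simp [hat _ (List.getElem_mem hk)]
      have h2 : t.countP (fun y => decide ([y, t[k]] ∈ rules)) = k :=
        ih hpt hndt (fun x hx => hirr x (by simp [hx]))
          (fun x hx y hy => hasym x (by simp [hx]) y (by simp [hy])) k hk
      simp [h1, h2]

theorem pv_find_unique {p : Int → Bool} (l : List Int) (v : Int)
    (hv : v ∈ l) (hp : ∀ x ∈ l, (p x = true ↔ x = v)) :
    l.find? p = some v := by
  induction l with
  | nil => cases hv
  | cons y ys ih =>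
    by_cases hy : y = v
    · subst hy
      have : p y = true := (hp y (by simp)).2 rfl
      simp [List.find?, this]
    · have hpy : p y = false := by
        rcases h : p y with _ | _
        · rfl
        · exact absurd ((hp y (by simp)).1 h) hy
      have hv' : v ∈ ys := by
        rcases hv with _ | h
        · exact absurd rfl hy
        · assumption
      simp [List.find?, hpy]
      exact ih hv' (fun x hx => hp x (by simp [hx]))

theorem pv_rule_step (u : List Int) (r : List Int) (h2 : 2 ≤ r.length) :
    (match PySem.List.index? u (r.getD 0 0), PySem.List.index? u (r.getD 1 0) with
     | some ia, some ib => decide (ib < ia)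
     | _, _ => false) = !pv_check_rule u r := by
  match r, h2 with
  | a :: b :: t, _ =>
    have e0 : PySem.List.pyGet? (a :: b :: t) 0 = some a := PySem.List.pyGet?_zero_cons a _
    have e1 : PySem.List.pyGet? (a :: b :: t) 1 = some b := by
      have h := PySem.List.pyGet?_ofNat (a :: b :: t) 1 (by simp)
      exact_mod_cast h
    have g0 : (a :: b :: t).getD 0 0 = a := rfl
    have g1 : (a :: b :: t).getD 1 0 = b := rfl
    rw [g0, g1]
    unfold pv_check_rule
    rw [e0, e1]
    by_cases ha : a ∈ u
    · by_cases hb : b ∈ u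
      · obtain ⟨ia, hia⟩ := Option.isSome_iff_exists.mp
          ((PySem.List.index?_isSome_iff u a).mpr ha)
        obtain ⟨ib, hib⟩ := Option.isSome_iff_exists.mp
          ((PySem.List.index?_isSome_iff u b).mpr hb)
        simp only [ha, hb, and_self, if_true, hia, hib]
        simp [gt_iff_lt]
      · obtain ⟨ia, hia⟩ := Option.isSome_iff_exists.mp
          ((PySem.List.index?_isSome_iff u a).mpr ha)
        have hib : PySem.List.index? u b = none := (PySem.List.index?_eq_none_iff u b).mpr hb
        simp only [PySem.List.index?_eq_idxOf?] at hia hib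
        simp [hia, hib, hb]
    · have hia : PySem.List.index? u a = none := (PySem.List.index?_eq_none_iff u a).mpr ha
      simp only [PySem.List.index?_eq_idxOf?] at hia
      simp [hia, ha]

theorem pv_invalid_eq (rules : List (List Int)) (u : List Int)
    (h2 : ∀ r ∈ rules, 2 ≤ r.length) :
    pvInvalidB rules u = !pv_check_rules u rules := by
  induction rules with
  | nil => simp [pvInvalidB, pv_check_rules]
  | cons r rs ih =>
    have hr : 2 ≤ r.length := h2 r (by simp)
    have ih' := ih (fun r' hr' => h2 r' (by simp [hr']))
    simp only [pvInvalidB, List.any_cons, pv_check_rules, List.map_cons, List.all_cons,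
      Bool.not_and] at *
    rw [pv_rule_step u r hr, ih']

theorem pv_center_props (rules : List (List Int)) (u : List Int)
    (hodd : u.length % 2 = 1) (hnd : u.Nodup)
    (hirr : ∀ a ∈ u, [a, a] ∉ rules)
    (htot : ∀ a ∈ u, ∀ b ∈ u, a ≠ b → ([a, b] ∈ rules ↔ [b, a] ∉ rules))
    (htrans : ∀ a ∈ u, ∀ b ∈ u, ∀ c ∈ u, [a, b] ∈ rules → [b, c] ∈ rules → [a, c] ∈ rules) :
    ∃ c : Int,
      (PySem.List.pyGet? (pv_csort rules u)
        (PySem.Int.floordiv ((pv_csort rules u).length : Int) 2)).getD 0 = c ∧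
      u.find? (fun x => u.countP (fun y => decide ([y, x] ∈ rules)) == u.length / 2)
        = some c := by
  have hperm : (pv_csort rules u).Perm u := pv_csort_perm rules u
  have hlen_s : (pv_csort rules u).length = u.length := hperm.length_eq
  have hm : u.length / 2 < (pv_csort rules u).length := by rw [hlen_s]; omega
  refine ⟨(pv_csort rules u)[u.length / 2]'hm, ?_, ?_⟩
  · have hfd : PySem.Int.floordiv (((pv_csort rules u).length : Nat) : Int) 2
        = (((pv_csort rules u).length / 2 : Nat) : Int) := by
      exact_mod_cast PySem.Int.floordiv_natCast (pv_csort rules u).length 2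
    rw [hfd, PySem.List.pyGet?_natCast]
    have : (pv_csort rules u).length / 2 = u.length / 2 := by rw [hlen_s]
    rw [this, List.getElem?_eq_getElem hm]
    rfl
  · have hnds : (pv_csort rules u).Nodup := hperm.symm.nodup hnd
    have hsorted : (pv_csort rules u).Pairwise (fun a b => [a, b] ∈ rules) :=
      pv_csort_sorted rules u hnd htot htrans
    have hmemS : ∀ z ∈ pv_csort rules u, z ∈ u := fun z hz => hperm.mem_iff.mp hz
    have hirr' : ∀ a ∈ pv_csort rules u, [a, a] ∉ rules := fun a ha => hirr a (hmemS a ha)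
    have hasym' : ∀ a ∈ pv_csort rules u, ∀ b ∈ pv_csort rules u, a ≠ b →
        ([a, b] ∈ rules ↔ [b, a] ∉ rules) :=
      fun a ha b hb hab => htot a (hmemS a ha) b (hmemS b hb) hab
    have hc_mem : (pv_csort rules u)[u.length / 2]'hm ∈ u :=
      hmemS _ (List.getElem_mem hm)
    apply pv_find_unique u _ hc_mem
    intro x hx
    have hxs : x ∈ pv_csort rules u := hperm.mem_iff.mpr hx
    obtain ⟨k, hk, hsk⟩ := List.mem_iff_getElem.mp hxs
    have hcount : u.countP (fun y => decide ([y, x] ∈ rules)) = k := by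
      have h1 : (pv_csort rules u).countP (fun y => decide ([y, x] ∈ rules)) = k := by
        have := pv_rank_at rules (pv_csort rules u) hsorted hnds hirr' hasym' k hk
        rwa [hsk] at this
      rw [← hperm.countP_eq, h1]
    rw [hcount]
    constructor
    · intro hbeq
      have : k = u.length / 2 := by simpa using hbeq
      subst this
      exact hsk.symm
    · intro hxc
      have : k = u.length / 2 := by
        have := hsk.trans hxc
        exact (hnds.getElem_inj_iff).mp this
      simp [this]

-- ===== VERDICT (by name: the statement is the Claim_ definition above) =====
theorem get_reorderd_centre_sum_spec : Claim_equal_get_reorderd_centre_sum := by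
  intro instructions rules hDom hPre
  obtain ⟨hlen, hinv⟩ := hPre
  unfold Spec_get_reorderd_centre_sum
  unfold get_reorderd_centre_sum get_reorderd_centre_sum_alt
  rw [List.foldl_filter]
  apply PySem.List.foldl_congr_mem'
  intro x hx acc
  by_cases hc : pv_check_rules x rules
  · simp [hc]
  · have hcf : pv_check_rules x rules = false := by simp [hc]
    have h2 : ∀ r ∈ rules, 2 ≤ r.length := hlen (List.ne_nil_of_mem hx)
    have hinvx : pvInvalidB rules x = true := by
      rw [pv_invalid_eq rules x h2, hcf]; rfl
    obtain ⟨hodd, hnd, hirr, htot, htrans⟩ := hinv x hx hinvx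
    obtain ⟨c, hget, hfind⟩ := pv_center_props rules x hodd hnd hirr htot htrans
    have hlens : (pv_csort rules x).length = x.length := (pv_csort_perm rules x).length_eq
    have hga : ((pv_csort rules x).length % 2 == 1) = true := by
      rw [hlens]; simp [hodd]
    have hgb : ((x.length % 2 : Nat) != 1) = false := by simp [hodd]
    simp only [hcf, Bool.false_eq_true, if_false, hga, if_true, hgb, hget, hfind]
    simp
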